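-- pv_equiv track=rewrite | github.com/danielchild1/LL1-Parser | helperFunctions.py | onion
-- ===== SOURCE A (Python) =====
-- def onion(first, second):
--     ret = []
--
--     if isinstance(first, list):
--         for i in first:
--             if i != None and i not in ret:
--                 ret.append(i)
--     else:
--         if first != None:
--             ret.append(first)
--
--
--     if isinstance(second, list):
--         for j in second:
--             if j != None and j not in ret:
--                 ret.append(j)
--     else:
--         if second != None and second not in ret:
--             ret.append(second)
--
--
--     # if len(ret) == 0:
--     #     return None
--     # elif len(ret) ==1:
--     #     return ret[0]
--
--     return ret
-- ===== SOURCE B (Python) =====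
-- def onion(first, second):
--     # Sieve-style dedup: repeatedly take the first remaining element, keep it,
--     # and filter every later occurrence of it (and all Nones) out of the rest.
--     def flat(a):
--         return list(a) if isinstance(a, list) else [a]
--     xs = [x for x in flat(first) + flat(second) if x != None]
--     ret = []
--     while xs:
--         h = xs[0]
--         ret.append(h)
--         xs = [y for y in xs[1:] if y != h]
--     return ret
-- ===== Notes on version B (the rewrite author's own statement) =====
-- stated objective: alternative
-- what changed: B flattens both arguments, drops Nones, then deduplicates by a sieve: repeatedly keep the head and filter all its later occurrences out of the remainder, instead of A's two loops that test membership in the growing output list.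
import Mathlib
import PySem

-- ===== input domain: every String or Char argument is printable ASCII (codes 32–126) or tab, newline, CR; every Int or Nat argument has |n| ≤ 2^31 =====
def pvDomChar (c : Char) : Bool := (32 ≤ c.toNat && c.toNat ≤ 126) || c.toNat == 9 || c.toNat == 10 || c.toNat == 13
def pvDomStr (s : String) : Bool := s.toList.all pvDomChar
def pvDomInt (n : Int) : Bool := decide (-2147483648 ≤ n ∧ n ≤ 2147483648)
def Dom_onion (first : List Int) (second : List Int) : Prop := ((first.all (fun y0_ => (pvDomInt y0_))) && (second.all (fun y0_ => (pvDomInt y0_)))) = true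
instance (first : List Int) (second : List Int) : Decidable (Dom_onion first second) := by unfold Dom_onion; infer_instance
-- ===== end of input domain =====

-- B deduplicates by a sieve (keep the head, filter its later occurrences out of the rest) instead of A's membership-in-output loops; objective: alternative decomposition.


-- ===== PORT A =====
-- Both parameters are lists here, so the 'isinstance(first, list)' branches apply;
-- 'i != None' is always true for an Int and is dropped.
def onion (first : List Int) (second : List Int) : List Int :=
  let ret := first.foldl (fun ret i => if i ∈ ret then ret else ret ++ [i]) []
  second.foldl (fun ret j => if j ∈ ret then ret else ret ++ [j]) ret

-- ===== PORT B =====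
-- the while loop of Source B: keep the head, filter elements equal to it out of the tail
def onionSieve : List Int → List Int
  | [] => []
  | h :: t => h :: onionSieve (t.filter (fun y => y ≠ h))
termination_by l => l.length
decreasing_by
  simpa using le_trans (List.length_filter_le _ _) (le_of_eq t.length_attach)

def onion_alt (first : List Int) (second : List Int) : List Int :=
  -- flat(first)+flat(second) with both arguments lists; 'x != None' always true for Int
  onionSieve (first ++ second)

-- ===== PRECONDITION & SPEC =====
def Spec_onion (first : List Int) (second : List Int) (out : List Int) : Prop := out = onion_alt first second
instance (first : List Int) (second : List Int) (out : List Int) : Decidable (Spec_onion first second out) := by unfold Spec_onion; infer_instance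

-- ===== CLAIM (what is proved, stated in full; the proofs are below) =====
def Claim_equal_onion : Prop := ∀ (first : List Int) (second : List Int), Dom_onion first second → Spec_onion first second (onion first second)

-- ===== LEMMAS AND PROOFS =====

-- invariant: A's fold with accumulator r equals r followed by the sieve of the elements not already in r
theorem foldl_dedup_eq_sieve (xs : List Int) (r : List Int) :
    xs.foldl (fun ret i => if i ∈ ret then ret else ret ++ [i]) r
      = r ++ onionSieve (xs.filter (fun x => x ∉ r)) := by
  induction xs generalizing r with
  | nil => rw [List.filter_nil, onionSieve]; simp
  | cons x t ih =>
    simp only [List.foldl_cons, List.filter_cons]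
    by_cases h : x ∈ r
    · simp [h, ih]
    · rw [if_neg h, ih]
      simp only [h, not_false_eq_true, decide_true, if_pos]
      have hf : (t.filter (fun y => decide (y ∉ r))).filter (fun y => y ≠ x)
          = t.filter (fun y => decide (y ∉ r ++ [x])) := by
        rw [List.filter_filter]
        apply List.filter_congr
        intro a _
        by_cases h1 : a ∈ r <;> by_cases h2 : a = x <;> simp [h1, h2]
      rw [onionSieve, hf]
      simp

-- ===== VERDICT (by name: the statement is the Claim_ definition above) =====
theorem onion_spec : Claim_equal_onion := by
  intro first second _
  show _ = onion_alt first second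
  simp only [onion, onion_alt]
  rw [← List.foldl_append, foldl_dedup_eq_sieve]
  simp
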